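-- pv_equiv track=rewrite | github.com/Nemeca99/Foundry_Bot | profile/bot_profile/personality_manager.py | _analyze_writing_style_patterns
-- ===== SOURCE A (Python) =====
-- from typing import Dict, List, Any, Optional
--
-- def _analyze_writing_style_patterns(
--     writing_samples: List[str]
-- ) -> Dict[str, bool]:
--     """Analyze writing samples for style patterns"""
--
--     patterns = {
--         "dialogue_heavy": False,
--         "descriptive": False,
--         "action_oriented": False,
--         "character_focused": False,
--     }
--
--     for sample in writing_samples:
--         sample_lower = sample.lower()
--
--         # Check for dialogue patterns
--         if (
--             '"' in sample
--             or "'" in sample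
--             or "said" in sample_lower
--             or "asked" in sample_lower
--         ):
--             patterns["dialogue_heavy"] = True
--
--         # Check for descriptive patterns
--         if any(
--             word in sample_lower
--             for word in ["beautiful", "detailed", "vivid", "rich", "colorful"]
--         ):
--             patterns["descriptive"] = True
--
--         # Check for action patterns
--         if any(
--             word in sample_lower
--             for word in ["moved", "ran", "jumped", "fought", "action", "quickly"]
--         ):
--             patterns["action_oriented"] = True
--
--         # Check for character focus
--         if any(
--             word in sample_lower
--             for word in ["character", "personality", "motivation", "development"]
--         ):
--             patterns["character_focused"] = True
--
--     return patterns
-- ===== SOURCE B (Python) =====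
-- from typing import Dict, List
--
--
-- def _analyze_writing_style_patterns(
--     writing_samples: List[str]
-- ) -> Dict[str, bool]:
--     """Analyze writing samples for style patterns.
--
--     Flattens the samples into one newline-joined lower-cased text and tests each
--     keyword once against that whole text: a keyword contains no newline, so it
--     occurs in the joined text exactly when it occurs in some sample.
--     """
--     text = "\n".join(s.lower() for s in writing_samples)
--     return {
--         "dialogue_heavy": '"' in text or "'" in text
--             or "said" in text or "asked" in text,
--         "descriptive": any(w in text for w in
--             ["beautiful", "detailed", "vivid", "rich", "colorful"]),
--         "action_oriented": any(w in text for w in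
--             ["moved", "ran", "jumped", "fought", "action", "quickly"]),
--         "character_focused": any(w in text for w in
--             ["character", "personality", "motivation", "development"]),
--     }
-- ===== Notes on version B (the rewrite author's own statement) =====
-- stated objective: faster
-- what changed: Instead of one pass over the samples mutating four dict flags keyword-by-keyword, B flattens the list into a single newline-joined lower-cased text and tests each keyword exactly once against that whole text (correct because no keyword contains a newline, so none can span a join boundary); one C-level substring scan per keyword replaces per-sample Python-level loop work.
import Mathlib
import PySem

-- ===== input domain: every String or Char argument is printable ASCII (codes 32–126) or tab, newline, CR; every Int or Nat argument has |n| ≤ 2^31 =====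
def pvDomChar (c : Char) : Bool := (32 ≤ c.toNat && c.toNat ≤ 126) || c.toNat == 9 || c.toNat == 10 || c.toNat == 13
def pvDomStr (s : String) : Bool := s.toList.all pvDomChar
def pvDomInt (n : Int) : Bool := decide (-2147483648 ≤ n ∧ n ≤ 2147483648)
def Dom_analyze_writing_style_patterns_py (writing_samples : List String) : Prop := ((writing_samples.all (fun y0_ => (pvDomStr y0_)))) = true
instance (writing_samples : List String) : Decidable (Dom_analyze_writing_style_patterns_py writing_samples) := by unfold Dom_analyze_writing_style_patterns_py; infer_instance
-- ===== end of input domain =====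

-- B replaces A's per-sample pass mutating four dict flags by flattening the samples
-- into ONE newline-joined lower-cased text and testing each keyword once against it
-- (correct because no keyword contains a newline, so it cannot span a join boundary).

-- ===== PORT A =====
-- the body of A's for-loop: conditionally set each of the four flags
def pvStepA (d : PySem.Dict String Bool) (sample : String) : PySem.Dict String Bool :=
  let sl := PySem.Str.lower sample
  let d := if PySem.Str.isIn "\"" sample || PySem.Str.isIn "'" sample
              || PySem.Str.isIn "said" sl || PySem.Str.isIn "asked" sl
           then d.insert "dialogue_heavy" true else d
  let d := if (["beautiful", "detailed", "vivid", "rich", "colorful"]).any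
                (fun w => PySem.Str.isIn w sl)
           then d.insert "descriptive" true else d
  let d := if (["moved", "ran", "jumped", "fought", "action", "quickly"]).any
                (fun w => PySem.Str.isIn w sl)
           then d.insert "action_oriented" true else d
  let d := if (["character", "personality", "motivation", "development"]).any
                (fun w => PySem.Str.isIn w sl)
           then d.insert "character_focused" true else d
  d

def analyze_writing_style_patterns_py (writing_samples : List String) : List (String × Bool) :=
  (writing_samples.foldl pvStepA
    ⟨[("dialogue_heavy", false), ("descriptive", false),
      ("action_oriented", false), ("character_focused", false)]⟩).items

-- ===== PORT B =====
def analyze_writing_style_patterns_py_alt (writing_samples : List String) : List (String × Bool) :=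
  let text := PySem.Str.join "\n" (writing_samples.map PySem.Str.lower)
  [("dialogue_heavy", PySem.Str.isIn "\"" text || PySem.Str.isIn "'" text
      || PySem.Str.isIn "said" text || PySem.Str.isIn "asked" text),
   ("descriptive", (["beautiful", "detailed", "vivid", "rich", "colorful"]).any
      (fun w => PySem.Str.isIn w text)),
   ("action_oriented", (["moved", "ran", "jumped", "fought", "action", "quickly"]).any
      (fun w => PySem.Str.isIn w text)),
   ("character_focused", (["character", "personality", "motivation", "development"]).any
      (fun w => PySem.Str.isIn w text))]

-- ===== PRECONDITION & SPEC =====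
def Spec_analyze_writing_style_patterns_py (writing_samples : List String) (out : List (String × Bool)) : Prop := out = analyze_writing_style_patterns_py_alt writing_samples
instance (writing_samples : List String) (out : List (String × Bool)) : Decidable (Spec_analyze_writing_style_patterns_py writing_samples out) := by unfold Spec_analyze_writing_style_patterns_py; infer_instance

-- ===== CLAIM (what is proved, stated in full; the proofs are below) =====
def Claim_equal_analyze_writing_style_patterns_py : Prop := ∀ (writing_samples : List String), Dom_analyze_writing_style_patterns_py writing_samples → Spec_analyze_writing_style_patterns_py writing_samples (analyze_writing_style_patterns_py writing_samples)

-- ===== LEMMAS AND PROOFS =====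

-- lower-casing fixes every char below 'A' (in particular '"' and '\''), so a
-- one-char needle below 'A' is in s.lower() iff it is in s
theorem pvLowerChar_eq_low {a c : Char} (hc : c.toNat < 65) :
    PySem.Chars.lowerChar a = c ↔ a = c := by
  have hfix : ∀ b : Char, b.toNat < 65 → PySem.Chars.lowerChar b = b := by
    intro b hb
    unfold PySem.Chars.lowerChar
    split_ifs with hu
    · exfalso
      simp only [PySem.Chars.isupper, Bool.and_eq_true, decide_eq_true_eq] at hu
      have hA : (65 : Nat) ≤ b.toNat := Fin.mk_le_mk.mp hu.1
      omega
    · rfl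
  constructor
  · intro h
    unfold PySem.Chars.lowerChar at h
    split_ifs at h with hu
    · exfalso
      simp only [PySem.Chars.isupper, Bool.and_eq_true, decide_eq_true_eq] at hu
      have hA : (65 : Nat) ≤ a.toNat := Fin.mk_le_mk.mp hu.1
      have hZ : a.toNat ≤ 90 := Fin.mk_le_mk.mp hu.2
      have h34 := congrArg Char.toNat h
      have hv : (Char.ofNat (a.toNat + 32)).toNat = a.toNat + 32 := by
        unfold Char.ofNat
        split_ifs with hv
        · rfl
        · exact absurd (Or.inl (by omega)) hv
      rw [hv] at h34
      omega
    · exact h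
  · intro h
    subst h
    exact hfix a hc

theorem pvMem_lower (c : Char) (hc : c.toNat < 65) (l : List Char) :
    c ∈ PySem.Chars.lower l ↔ c ∈ l := by
  simp only [PySem.Chars.lower, List.mem_map]
  constructor
  · rintro ⟨a, ha, h⟩
    rwa [(pvLowerChar_eq_low hc).mp h] at ha
  · intro h
    exact ⟨c, h, (pvLowerChar_eq_low hc).mpr rfl⟩

theorem pvIsIn_single_lower (c : Char) (hc : c.toNat < 65) (s : String) :
    PySem.Str.isIn (String.ofList [c]) (PySem.Str.lower s)
      = PySem.Str.isIn (String.ofList [c]) s := by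
  rw [Bool.eq_iff_iff, PySem.Str.isIn_iff_infix, PySem.Str.isIn_iff_infix]
  simp [List.singleton_infix_iff, pvMem_lower c hc]

theorem pvQuote_lower (s : String) :
    PySem.Str.isIn "\"" (PySem.Str.lower s) = PySem.Str.isIn "\"" s :=
  pvIsIn_single_lower '"' (by decide) s

theorem pvApos_lower (s : String) :
    PySem.Str.isIn "'" (PySem.Str.lower s) = PySem.Str.isIn "'" s :=
  pvIsIn_single_lower '\'' (by decide) s

-- the per-sample condition of flag i, as A evaluates it on the lowered sample
def pvCond (words : List String) (s : String) : Bool :=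
  words.any (fun w => PySem.Str.isIn w (PySem.Str.lower s))

def pvD4 (b1 b2 b3 b4 : Bool) : PySem.Dict String Bool :=
  ⟨[("dialogue_heavy", b1), ("descriptive", b2),
    ("action_oriented", b3), ("character_focused", b4)]⟩

theorem pvIns1 (b1 b2 b3 b4 c : Bool) :
    (if c then (pvD4 b1 b2 b3 b4).insert "dialogue_heavy" true else pvD4 b1 b2 b3 b4)
      = pvD4 (b1 || c) b2 b3 b4 := by
  cases c <;> simp [pvD4, PySem.Dict.insert, PySem.Dict.contains]

theorem pvIns2 (b1 b2 b3 b4 c : Bool) :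
    (if c then (pvD4 b1 b2 b3 b4).insert "descriptive" true else pvD4 b1 b2 b3 b4)
      = pvD4 b1 (b2 || c) b3 b4 := by
  cases c <;> simp [pvD4, PySem.Dict.insert, PySem.Dict.contains]

theorem pvIns3 (b1 b2 b3 b4 c : Bool) :
    (if c then (pvD4 b1 b2 b3 b4).insert "action_oriented" true else pvD4 b1 b2 b3 b4)
      = pvD4 b1 b2 (b3 || c) b4 := by
  cases c <;> simp [pvD4, PySem.Dict.insert, PySem.Dict.contains]

theorem pvIns4 (b1 b2 b3 b4 c : Bool) :
    (if c then (pvD4 b1 b2 b3 b4).insert "character_focused" true else pvD4 b1 b2 b3 b4)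
      = pvD4 b1 b2 b3 (b4 || c) := by
  cases c <;> simp [pvD4, PySem.Dict.insert, PySem.Dict.contains]

theorem pvStepA_eq (b1 b2 b3 b4 : Bool) (s : String) :
    pvStepA (pvD4 b1 b2 b3 b4) s
    = pvD4 (b1 || pvCond ["\"", "'", "said", "asked"] s)
           (b2 || pvCond ["beautiful", "detailed", "vivid", "rich", "colorful"] s)
           (b3 || pvCond ["moved", "ran", "jumped", "fought", "action", "quickly"] s)
           (b4 || pvCond ["character", "personality", "motivation", "development"] s) := by
  show (let sl := PySem.Str.lower s;
        let d := if PySem.Str.isIn "\"" s || PySem.Str.isIn "'" s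
                    || PySem.Str.isIn "said" sl || PySem.Str.isIn "asked" sl
                 then (pvD4 b1 b2 b3 b4).insert "dialogue_heavy" true else pvD4 b1 b2 b3 b4;
        let d := if (["beautiful", "detailed", "vivid", "rich", "colorful"]).any
                      (fun w => PySem.Str.isIn w sl)
                 then d.insert "descriptive" true else d;
        let d := if (["moved", "ran", "jumped", "fought", "action", "quickly"]).any
                      (fun w => PySem.Str.isIn w sl)
                 then d.insert "action_oriented" true else d;
        let d := if (["character", "personality", "motivation", "development"]).any
                      (fun w => PySem.Str.isIn w sl)
                 then d.insert "character_focused" true else d;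
        d) = _
  simp only []
  rw [pvIns1, pvIns2, pvIns3, pvIns4]
  simp only [pvCond, List.any_cons, List.any_nil, Bool.or_false,
    pvQuote_lower, pvApos_lower, Bool.or_assoc]

-- A's fold over the samples computes, flag by flag, 'some sample satisfies the condition'
theorem pvFold_eq (ws : List String) (b1 b2 b3 b4 : Bool) :
    (ws.foldl pvStepA (pvD4 b1 b2 b3 b4)).items
    = [("dialogue_heavy", b1 || ws.any (fun s => pvCond ["\"", "'", "said", "asked"] s)),
       ("descriptive", b2 || ws.any (fun s => pvCond ["beautiful", "detailed", "vivid", "rich", "colorful"] s)),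
       ("action_oriented", b3 || ws.any (fun s => pvCond ["moved", "ran", "jumped", "fought", "action", "quickly"] s)),
       ("character_focused", b4 || ws.any (fun s => pvCond ["character", "personality", "motivation", "development"] s))] := by
  induction ws generalizing b1 b2 b3 b4 with
  | nil => simp [pvD4]
  | cons s ws ih =>
    rw [List.foldl_cons, pvStepA_eq, ih]
    simp [Bool.or_assoc]

-- a prefix of u ++ c :: v that avoids c is a prefix of u
theorem pvPrefix_sep {c : Char} : ∀ {n : List Char}, ∀ u v : List Char,
    c ∉ n → n <+: u ++ c :: v → n <+: u := by
  intro n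
  induction n with
  | nil => intro u v _ _; exact List.nil_prefix
  | cons y n ih =>
    intro u v hc h
    cases u with
    | nil =>
      exfalso
      rcases h with ⟨t, ht⟩
      simp only [List.nil_append, List.cons_append, List.cons.injEq] at ht
      exact hc (ht.1 ▸ List.mem_cons_self)
    | cons x u =>
      rcases h with ⟨t, ht⟩
      simp only [List.cons_append, List.cons.injEq] at ht
      obtain ⟨rfl, ht⟩ := ht
      rcases ih u v (fun h => hc (List.mem_cons_of_mem _ h)) ⟨t, ht⟩ with ⟨t2, ht2⟩
      exact ⟨t2, by rw [List.cons_append, ht2]⟩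

-- a needle avoiding the separator char is an infix of a ++ c :: b iff of a or of b
theorem pvInfix_sep {c : Char} {n : List Char} (hc : c ∉ n) :
    ∀ a b : List Char, (n <:+: a ++ c :: b) ↔ (n <:+: a ∨ n <:+: b) := by
  intro a
  induction a with
  | nil =>
    intro b
    simp only [List.nil_append]
    rw [List.infix_cons_iff]
    constructor
    · rintro (h | h)
      · cases n with
        | nil => exact Or.inl (List.nil_infix)
        | cons y n =>
          exfalso
          rcases h with ⟨t, ht⟩
          simp only [List.cons_append, List.cons.injEq] at ht
          exact hc (ht.1 ▸ List.mem_cons_self)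
      · exact Or.inr h
    · rintro (h | h)
      · rw [List.infix_nil] at h
        subst h
        exact Or.inr List.nil_infix
      · exact Or.inr h
  | cons x a ih =>
    intro b
    rw [List.cons_append, List.infix_cons_iff, ih b]
    constructor
    · rintro (h | h | h)
      · have h' : n <+: (x :: a) ++ c :: b := by rwa [List.cons_append]
        exact Or.inl (pvPrefix_sep (x :: a) b hc h').isInfix
      · exact Or.inl (List.infix_cons h)
      · exact Or.inr h
    · rintro (h | h)
      · rcases List.infix_cons_iff.mp h with h | h
        · have h' := h.trans ((x :: a).prefix_append (c :: b))
          rw [List.cons_append] at h'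
          exact Or.inl h'
        · exact Or.inr (Or.inl h)
      · exact Or.inr (Or.inr h)

-- a newline-free needle occurs in the newline-join of parts iff it occurs in some part
theorem pvIsIn_join (n : List Char) (hne : n ≠ []) (hc : '\n' ∉ n) :
    ∀ parts : List (List Char),
      (n <:+: PySem.Chars.join ['\n'] parts) ↔ ∃ p ∈ parts, n <:+: p := by
  intro parts
  induction parts with
  | nil =>
    rw [PySem.Chars.join_nil, List.infix_nil]
    simp [hne]
  | cons p rest ih =>
    cases rest with
    | nil =>
      rw [PySem.Chars.join_singleton]
      simp
    | cons q rest' =>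
      rw [PySem.Chars.join_cons_cons, List.append_assoc, List.singleton_append,
        pvInfix_sep hc, ih]
      simp only [List.mem_cons]
      constructor
      · rintro (h | ⟨r, hr, h⟩)
        · exact ⟨p, Or.inl rfl, h⟩
        · exact ⟨r, Or.inr hr, h⟩
      · rintro ⟨r, hr | hr, h⟩
        · exact Or.inl (hr ▸ h)
        · exact Or.inr ⟨r, hr, h⟩

-- B's single test of a newline-free keyword on the joined lowered text equals
-- A's 'some sample's lowered text contains it'
theorem pvIsIn_text (w : String) (hne : w.toList ≠ []) (hc : '\n' ∉ w.toList)
    (ws : List String) :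
    PySem.Str.isIn w (PySem.Str.join "\n" (ws.map PySem.Str.lower))
      = ws.any (fun s => PySem.Str.isIn w (PySem.Str.lower s)) := by
  rw [Bool.eq_iff_iff, PySem.Str.isIn_iff_infix, PySem.Str.toList_join]
  have hmap : (ws.map PySem.Str.lower).map String.toList
      = ws.map (fun s => (PySem.Str.lower s).toList) := by
    rw [List.map_map]; rfl
  rw [hmap]
  rw [show ("\n" : String).toList = ['\n'] from rfl]
  rw [pvIsIn_join w.toList hne hc]
  simp only [List.any_eq_true, List.mem_map]
  constructor
  · rintro ⟨p, ⟨s, hs, rfl⟩, h⟩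
    exact ⟨s, hs, (PySem.Str.isIn_iff_infix _ _).mpr h⟩
  · rintro ⟨s, hs, h⟩
    exact ⟨(PySem.Str.lower s).toList, ⟨s, hs, rfl⟩, (PySem.Str.isIn_iff_infix _ _).mp h⟩

-- any distributes over a pointwise || : lets one pass over ws split into one pass per keyword
theorem pvAnyOr {α : Type} (l : List α) (p q : α → Bool) :
    (l.any fun x => p x || q x) = (l.any p || l.any q) := by
  induction l with
  | nil => rfl
  | cons x l ih =>
    simp [List.any_cons, ih]
    cases p x <;> cases q x <;> simp

-- ===== VERDICT (by name: the statement is the Claim_ definition above) =====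
theorem analyze_writing_style_patterns_py_spec : Claim_equal_analyze_writing_style_patterns_py := by
  intro ws _
  unfold Spec_analyze_writing_style_patterns_py
  unfold analyze_writing_style_patterns_py analyze_writing_style_patterns_py_alt
  rw [show (⟨[("dialogue_heavy", false), ("descriptive", false),
      ("action_oriented", false), ("character_focused", false)]⟩ : PySem.Dict String Bool)
      = pvD4 false false false false from rfl, pvFold_eq]
  simp only [List.any_cons, List.any_nil, Bool.or_false]
  rw [pvIsIn_text "\"" (by decide) (by decide) ws,
      pvIsIn_text "'" (by decide) (by decide) ws,
      pvIsIn_text "said" (by decide) (by decide) ws,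
      pvIsIn_text "asked" (by decide) (by decide) ws,
      pvIsIn_text "beautiful" (by decide) (by decide) ws,
      pvIsIn_text "detailed" (by decide) (by decide) ws,
      pvIsIn_text "vivid" (by decide) (by decide) ws,
      pvIsIn_text "rich" (by decide) (by decide) ws,
      pvIsIn_text "colorful" (by decide) (by decide) ws,
      pvIsIn_text "moved" (by decide) (by decide) ws,
      pvIsIn_text "ran" (by decide) (by decide) ws,
      pvIsIn_text "jumped" (by decide) (by decide) ws,
      pvIsIn_text "fought" (by decide) (by decide) ws,
      pvIsIn_text "action" (by decide) (by decide) ws,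
      pvIsIn_text "quickly" (by decide) (by decide) ws,
      pvIsIn_text "character" (by decide) (by decide) ws,
      pvIsIn_text "personality" (by decide) (by decide) ws,
      pvIsIn_text "motivation" (by decide) (by decide) ws,
      pvIsIn_text "development" (by decide) (by decide) ws]
  simp only [pvCond, List.any_cons, List.any_nil, Bool.or_false, pvAnyOr,
    Bool.or_assoc, Bool.false_or]
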